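-- pv_equiv track=rewrite | github.com/eqan/Exam-Schedule-Generator-Using-Local-Search-Algorithms | program-haris.py | studentcheck
-- ===== SOURCE A (Python) =====
-- import copy
--
-- def studentcheck(examschedule, studentcourse):
--     templist = copy.deepcopy(examschedule)
--     flag = False
--     x = 0
--     for i in templist:
--         for j in templist:
--             if i[0] != j[0] and i[0] in studentcourse and j[0] in studentcourse:
--                 if i[len(i) - 1] == j[len(j) - 1] and i[len(i) - 2] == j[len(j) - 2]:
--                     flag = True
--                     if i in templist and j in templist:
--                         templist.remove(i)
--                         templist.remove(j)
--     return flag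
-- ===== SOURCE B (Python) =====
-- def studentcheck(examschedule, studentcourse):
--     courses = set(studentcourse)
--     seen = {}
--     for row in examschedule:
--         cid = row[0]
--         if cid in courses:
--             key = (row[len(row) - 2], row[len(row) - 1])
--             if key in seen:
--                 if seen[key] != cid:
--                     return True
--             else:
--                 seen[key] = cid
--     return False
-- ===== Notes on version B (the rewrite author's own statement) =====
-- stated objective: alternative
-- what changed: Replaces A's all-pairs scan over a mutating deepcopy by a single pass that hashes each exam's slot key (last two fields) to the first enrolled course id seen there and flags as soon as a slot key recurs with a different id.
import Mathlib
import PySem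

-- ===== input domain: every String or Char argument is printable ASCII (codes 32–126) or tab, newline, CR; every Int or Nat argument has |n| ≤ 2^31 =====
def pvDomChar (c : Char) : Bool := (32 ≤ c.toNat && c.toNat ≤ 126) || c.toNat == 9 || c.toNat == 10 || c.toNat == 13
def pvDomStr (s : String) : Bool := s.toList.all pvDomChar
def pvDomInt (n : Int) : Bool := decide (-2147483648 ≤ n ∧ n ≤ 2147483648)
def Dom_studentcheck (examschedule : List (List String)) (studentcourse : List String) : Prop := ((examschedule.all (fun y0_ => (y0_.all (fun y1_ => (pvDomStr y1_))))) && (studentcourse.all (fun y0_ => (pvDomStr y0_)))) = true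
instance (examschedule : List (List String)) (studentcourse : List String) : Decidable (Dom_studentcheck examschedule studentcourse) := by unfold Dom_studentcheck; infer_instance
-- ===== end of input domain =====

-- B replaces A's all-pairs double scan (with its remove-while-iterating bookkeeping) by a single
-- hashed pass mapping each slot key to the first enrolled course id seen there; A mutates only its
-- own deepcopy, so no caller-visible side effect is lost and the equivalence is about the flag.

-- ===== PORT A =====
-- i[0] != j[0] and i[0] in studentcourse and j[0] in studentcourse
--   and i[len(i)-1] == j[len(j)-1] and i[len(i)-2] == j[len(j)-2]
def condA (studentcourse : List String) (i j : List String) : Bool :=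
  ((PySem.List.pyGet? i 0).getD "" != (PySem.List.pyGet? j 0).getD "")
    && studentcourse.contains ((PySem.List.pyGet? i 0).getD "")
    && studentcourse.contains ((PySem.List.pyGet? j 0).getD "")
    && ((PySem.List.pyGet? i ((i.length : Int) - 1)).getD ""
          == (PySem.List.pyGet? j ((j.length : Int) - 1)).getD "")
    && ((PySem.List.pyGet? i ((i.length : Int) - 2)).getD ""
          == (PySem.List.pyGet? j ((j.length : Int) - 2)).getD "")

-- if i in templist and j in templist: templist.remove(i); templist.remove(j)
def removeTwoA (lst : List (List String)) (i j : List String) : List (List String) :=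
  if lst.contains i && lst.contains j then
    let l1 := (PySem.List.remove? lst i).getD lst
    (PySem.List.remove? l1 j).getD l1
  else lst

-- the inner 'for j in templist' loop: Python's list iterator over the list being mutated
-- (index b into the CURRENT list), exactly CPython's semantics; fuel only makes the
-- recursion structural (fuel = lst.length always suffices: b grows, the list only shrinks)
def innerA (studentcourse : List String) (i : List String) :
    Nat → List (List String) → Nat → Bool → List (List String) × Bool
  | 0, lst, _, flag => (lst, flag)
  | fuel + 1, lst, b, flag =>
    if h : b < lst.length then
      if condA studentcourse i lst[b] then
        innerA studentcourse i fuel (removeTwoA lst i lst[b]) (b + 1) true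
      else
        innerA studentcourse i fuel lst (b + 1) flag
    else (lst, flag)

-- the outer 'for i in templist' loop (same iterator protocol; fuel = initial length suffices)
def outerA (studentcourse : List String) :
    Nat → List (List String) → Nat → Bool → Bool
  | 0, _, _, flag => flag
  | fuel + 1, lst, a, flag =>
    if h : a < lst.length then
      outerA studentcourse fuel (innerA studentcourse lst[a] lst.length lst 0 flag).1 (a + 1)
        (innerA studentcourse lst[a] lst.length lst 0 flag).2
    else flag

def studentcheck (examschedule : List (List String)) (studentcourse : List String) : Bool :=
  -- templist = copy.deepcopy(examschedule): an equal value; x = 0 is dead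
  outerA studentcourse examschedule.length examschedule 0 false

-- ===== PORT B =====
-- cid = row[0]
def cidOf (row : List String) : String := (PySem.List.pyGet? row 0).getD ""

-- key = (row[len(row) - 2], row[len(row) - 1])
def keyB (row : List String) : String × String :=
  ((PySem.List.pyGet? row ((row.length : Int) - 2)).getD "",
   (PySem.List.pyGet? row ((row.length : Int) - 1)).getD "")

def goB (courses : PySem.Set String) (seen : PySem.Dict (String × String) String) :
    List (List String) → Bool
  | [] => false
  | row :: rest =>
    if PySem.Set.contains courses (cidOf row) then
      match seen.get? (keyB row) with
      | some c => if c != cidOf row then true else goB courses seen rest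
      | none => goB courses (seen.insert (keyB row) (cidOf row)) rest
    else goB courses seen rest

def studentcheck_alt (examschedule : List (List String)) (studentcourse : List String) : Bool :=
  goB (PySem.Set.ofList studentcourse) PySem.Dict.empty examschedule

-- ===== PRECONDITION & SPEC =====
-- Pre_ excludes schedules containing an empty row: there Python A raises IndexError at i[0]
-- (and B likewise at row[0]); nothing else is excluded.
def Pre_studentcheck (examschedule : List (List String)) (studentcourse : List String) : Prop :=
  ∀ r ∈ examschedule, r ≠ []
instance (examschedule : List (List String)) (studentcourse : List String) :
    Decidable (Pre_studentcheck examschedule studentcourse) := by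
  unfold Pre_studentcheck; infer_instance

def pvWitness_studentcheck : List (List String) × List String :=
  ([["CS1", "Mon", "9am"], ["CS2", "Mon", "9am"]], ["CS1", "CS2"])

def Spec_studentcheck (examschedule : List (List String)) (studentcourse : List String) (out : Bool) : Prop := out = studentcheck_alt examschedule studentcourse
instance (examschedule : List (List String)) (studentcourse : List String) (out : Bool) : Decidable (Spec_studentcheck examschedule studentcourse out) := by unfold Spec_studentcheck; infer_instance

-- ===== CLAIM (what is proved, stated in full; the proofs are below) =====
def Claim_equal_studentcheck : Prop := ∀ (examschedule : List (List String)) (studentcourse : List String), Dom_studentcheck examschedule studentcourse → Pre_studentcheck examschedule studentcourse → Spec_studentcheck examschedule studentcourse (studentcheck examschedule studentcourse)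

-- ===== LEMMAS AND PROOFS =====

-- the common, order-free description of a conflict: two rows with distinct course ids,
-- both taken by the student, sharing a slot key
def ConflictPair (studentcourse : List String) (es : List (List String)) : Prop :=
  ∃ r ∈ es, ∃ s ∈ es, cidOf r ∈ studentcourse ∧ cidOf s ∈ studentcourse ∧
    keyB r = keyB s ∧ cidOf r ≠ cidOf s

theorem condA_iff (sc : List String) (i j : List String) :
    condA sc i j = true ↔
      cidOf i ∈ sc ∧ cidOf j ∈ sc ∧ keyB i = keyB j ∧ cidOf i ≠ cidOf j := by
  simp only [condA, cidOf, keyB, Bool.and_eq_true, bne_iff_ne, beq_iff_eq,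
    List.contains_eq_mem, decide_eq_true_eq, Prod.mk.injEq, ne_eq]
  tauto

-- ----- A's loops compute "some conflicting pair exists" -----

theorem removeGetD_length_le {α : Type} [BEq α] [LawfulBEq α] (l : List α) (v : α) :
    ((PySem.List.remove? l v).getD l).length ≤ l.length := by
  by_cases hm : v ∈ l
  · rw [PySem.List.remove?_eq_some_erase l v hm]
    simpa using List.length_erase_le (l := l) (a := v)
  · rw [(PySem.List.remove?_eq_none_iff l v).mpr hm]
    simp

theorem removeTwoA_length_le (lst : List (List String)) (i j : List String) :
    (removeTwoA lst i j).length ≤ lst.length := by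
  unfold removeTwoA
  split
  · exact le_trans (removeGetD_length_le _ j) (removeGetD_length_le lst i)
  · exact le_refl _


-- the flag after the inner loop: the old flag or "some j from index b on conflicts with i"
theorem innerA_snd (sc : List String) (i : List String) :
    ∀ (fuel : Nat) (lst : List (List String)) (b : Nat) (flag : Bool),
      lst.length - b ≤ fuel →
      (innerA sc i fuel lst b flag).2 = (flag || (lst.drop b).any (condA sc i)) := by
  intro fuel
  induction fuel with
  | zero =>
      intro lst b flag hf
      rw [innerA, List.drop_eq_nil_of_le (by omega)]
      simp
  | succ fuel ih =>
      intro lst b flag hf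
      rw [innerA]
      by_cases h : b < lst.length
      · rw [dif_pos h]
        by_cases hc : condA sc i lst[b] = true
        · rw [if_pos hc,
            ih _ (b + 1) true (by have := removeTwoA_length_le lst i lst[b]; omega),
            List.drop_eq_getElem_cons h, List.any_cons, hc]
          simp
        · have hc' : condA sc i lst[b] = false := by simpa using hc
          rw [if_neg (by simp [hc']), ih lst (b + 1) flag (by omega),
            List.drop_eq_getElem_cons h, List.any_cons, hc']
          simp
      · rw [dif_neg h, List.drop_eq_nil_of_le (by omega)]
        simp

-- while no conflict was seen, nothing has been removed
theorem innerA_false_of_no_hit (sc : List String) (i : List String) :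
    ∀ (fuel : Nat) (lst : List (List String)) (b : Nat),
      lst.length - b ≤ fuel →
      (lst.drop b).any (condA sc i) = false →
      innerA sc i fuel lst b false = (lst, false) := by
  intro fuel
  induction fuel with
  | zero => intro lst b hf h; rw [innerA]
  | succ fuel ih =>
      intro lst b hf h
      rw [innerA]
      by_cases hb : b < lst.length
      · rw [List.drop_eq_getElem_cons hb, List.any_cons, Bool.or_eq_false_iff] at h
        rw [dif_pos hb, if_neg (by simp [h.1]), ih lst (b + 1) (by omega) h.2]
      · rw [dif_neg hb]

-- once the flag is set the outer loop can only return true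
theorem outerA_of_true (sc : List String) :
    ∀ (fuel : Nat) (lst : List (List String)) (a : Nat),
      outerA sc fuel lst a true = true := by
  intro fuel
  induction fuel with
  | zero => intro lst a; rw [outerA]
  | succ fuel ih =>
      intro lst a
      rw [outerA]
      by_cases h : a < lst.length
      · rw [dif_pos h,
          show (innerA sc lst[a] lst.length lst 0 true).2 = true from by
            rw [innerA_snd sc lst[a] lst.length lst 0 true (by omega)]; simp]
        exact ih _ (a + 1)
      · rw [dif_neg h]

theorem outerA_false_eq (sc : List String) (lst : List (List String)) :
    ∀ (fuel a : Nat), lst.length - a ≤ fuel →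
      outerA sc fuel lst a false = (lst.drop a).any (fun i => lst.any (condA sc i)) := by
  intro fuel
  induction fuel with
  | zero =>
      intro a ha
      rw [outerA, List.drop_eq_nil_of_le (by omega)]
      rfl
  | succ fuel ih =>
      intro a ha
      rw [outerA]
      by_cases h : a < lst.length
      · rw [dif_pos h, List.drop_eq_getElem_cons h, List.any_cons]
        by_cases hq : lst.any (condA sc lst[a]) = true
        · rw [show (innerA sc lst[a] lst.length lst 0 false).2 = true from by
            rw [innerA_snd sc lst[a] lst.length lst 0 false (by omega)]; simpa using hq]
          rw [outerA_of_true, hq]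
          simp
        · have hq' : lst.any (condA sc lst[a]) = false := by simpa using hq
          rw [innerA_false_of_no_hit sc lst[a] lst.length lst 0 (by omega) (by simpa using hq')]
          rw [ih (a + 1) (by omega), hq']
          simp
      · rw [dif_neg h, List.drop_eq_nil_of_le (by omega)]
        rfl

theorem studentcheck_iff (es : List (List String)) (sc : List String) :
    studentcheck es sc = true ↔ ConflictPair sc es := by
  unfold studentcheck
  rw [outerA_false_eq sc es es.length 0 (by omega)]
  simp only [List.drop_zero, List.any_eq_true, ConflictPair]
  constructor
  · rintro ⟨r, hr, s, hs, hc⟩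
    rw [condA_iff] at hc
    exact ⟨r, hr, s, hs, hc.1, hc.2.1, hc.2.2.1, hc.2.2.2⟩
  · rintro ⟨r, hr, s, hs, h1, h2, h3, h4⟩
    exact ⟨r, hr, s, hs, (condA_iff sc r s).mpr ⟨h1, h2, h3, h4⟩⟩

-- ----- B's single hashed pass computes the same proposition -----

-- membership in set(studentcourse) is membership in studentcourse
theorem setContains_iff (sc : List String) (x : String) :
    PySem.Set.contains (PySem.Set.ofList sc) x = true ↔ x ∈ sc := by
  rw [PySem.Set.contains_iff]
  exact PySem.Set.mem_ofList sc x

-- a row whose key is already claimed in seen by a DIFFERENT id makes goB fire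
theorem goB_hit (sc : List String) (rows : List (List String))
    (seen : PySem.Dict (String × String) String)
    (h : ∃ r ∈ rows, cidOf r ∈ sc ∧ ∃ c, seen.get? (keyB r) = some c ∧ c ≠ cidOf r) :
    goB (PySem.Set.ofList sc) seen rows = true := by
  induction rows generalizing seen with
  | nil => simp at h
  | cons x rest ih =>
      obtain ⟨r, hr, hq, c, hget, hne⟩ := h
      rcases List.mem_cons.mp hr with rfl | hr
      · have hx := (setContains_iff sc (cidOf r)).mpr hq
        simp [goB, hx, hget, bne_iff_ne, hne, hq]
      · by_cases hx : PySem.Set.contains (PySem.Set.ofList sc) (cidOf x) = true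
        · cases hgx : seen.get? (keyB x) with
          | some cx =>
              by_cases hcx : cx = cidOf x
              · subst hcx
                simp only [goB, hx, if_true, hgx, bne_self_eq_false, Bool.false_eq_true,
                  if_false]
                exact ih seen ⟨r, hr, hq, c, hget, hne⟩
              · simp [goB, hx, hgx, bne_iff_ne, hcx, (setContains_iff sc (cidOf x)).mp hx]
          | none =>
              simp only [goB, hx, if_true, hgx]
              refine ih _ ⟨r, hr, hq, c, ?_, hne⟩
              rw [PySem.Dict.get?_insert]
              split
              · next heq => rw [heq, hgx] at hget; cases hget
              · exact hget
        · have hx' : PySem.Set.contains (PySem.Set.ofList sc) (cidOf x) = false := by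
            simpa using hx
          simp only [goB, hx', Bool.false_eq_true, if_false]
          exact ih seen ⟨r, hr, hq, c, hget, hne⟩

-- a conflicting pair among the remaining rows makes goB fire, whatever seen holds
theorem goB_complete (sc : List String) (rows : List (List String))
    (seen : PySem.Dict (String × String) String)
    (h : ∃ r ∈ rows, ∃ s ∈ rows, cidOf r ∈ sc ∧ cidOf s ∈ sc ∧
          keyB r = keyB s ∧ cidOf r ≠ cidOf s) :
    goB (PySem.Set.ofList sc) seen rows = true := by
  induction rows generalizing seen with
  | nil => simp at h
  | cons x rest ih =>
      obtain ⟨r, hr, s, hs, hqr, hqs, hk, hne⟩ := h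
      rcases List.mem_cons.mp hr with rfl | hr' <;> rcases List.mem_cons.mp hs with rfl | hs'
      · exact absurd rfl hne
      · -- the pair is (x, s) with s ∈ rest
        have hx := (setContains_iff sc (cidOf r)).mpr hqr
        cases hgx : seen.get? (keyB r) with
        | some c =>
            by_cases hc : c = cidOf r
            · subst hc
              simp only [goB, hx, if_true, hgx, bne_self_eq_false, Bool.false_eq_true, if_false]
              exact goB_hit sc rest seen ⟨s, hs', hqs, cidOf r, hk ▸ hgx, hne⟩
            · simp [goB, hx, hgx, bne_iff_ne, hc, hqr]
        | none =>
            simp only [goB, hx, if_true, hgx]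
            refine goB_hit sc rest _ ⟨s, hs', hqs, cidOf r, ?_, hne⟩
            rw [← hk, PySem.Dict.get?_insert, if_pos rfl]
      · -- the pair is (r, x) with r ∈ rest: symmetric
        have hx := (setContains_iff sc (cidOf s)).mpr hqs
        cases hgx : seen.get? (keyB s) with
        | some c =>
            by_cases hc : c = cidOf s
            · subst hc
              simp only [goB, hx, if_true, hgx, bne_self_eq_false, Bool.false_eq_true, if_false]
              exact goB_hit sc rest seen ⟨r, hr', hqr, cidOf s, hk.symm ▸ hgx, fun he => hne he.symm⟩
            · simp [goB, hx, hgx, bne_iff_ne, hc, hqs]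
        | none =>
            simp only [goB, hx, if_true, hgx]
            refine goB_hit sc rest _ ⟨r, hr', hqr, cidOf s, ?_, fun he => hne he.symm⟩
            rw [hk, PySem.Dict.get?_insert, if_pos rfl]
      · -- both rows of the pair are in rest
        by_cases hx : PySem.Set.contains (PySem.Set.ofList sc) (cidOf x) = true
        · cases hgx : seen.get? (keyB x) with
          | some c =>
              by_cases hc : c = cidOf x
              · subst hc
                simp only [goB, hx, if_true, hgx, bne_self_eq_false, Bool.false_eq_true, if_false]
                exact ih seen ⟨r, hr', s, hs', hqr, hqs, hk, hne⟩
              · simp [goB, hx, hgx, bne_iff_ne, hc, (setContains_iff sc (cidOf x)).mp hx]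
          | none =>
              simp only [goB, hx, if_true, hgx]
              exact ih _ ⟨r, hr', s, hs', hqr, hqs, hk, hne⟩
        · have hx' : PySem.Set.contains (PySem.Set.ofList sc) (cidOf x) = false := by
            simpa using hx
          simp only [goB, hx', Bool.false_eq_true, if_false]
          exact ih seen ⟨r, hr', s, hs', hqr, hqs, hk, hne⟩

-- soundness: when goB fires there is a hit against seen or a conflicting pair in the rows
theorem goB_sound (sc : List String) (rows : List (List String))
    (seen : PySem.Dict (String × String) String)
    (h : goB (PySem.Set.ofList sc) seen rows = true) :
    (∃ r ∈ rows, cidOf r ∈ sc ∧ ∃ c, seen.get? (keyB r) = some c ∧ c ≠ cidOf r) ∨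
    (∃ r ∈ rows, ∃ s ∈ rows, cidOf r ∈ sc ∧ cidOf s ∈ sc ∧
       keyB r = keyB s ∧ cidOf r ≠ cidOf s) := by
  induction rows generalizing seen with
  | nil => simp [goB] at h
  | cons x rest ih =>
      by_cases hx : PySem.Set.contains (PySem.Set.ofList sc) (cidOf x) = true
      · have hqx : cidOf x ∈ sc := (setContains_iff sc (cidOf x)).mp hx
        cases hgx : seen.get? (keyB x) with
        | some c =>
            by_cases hc : c = cidOf x
            · subst hc
              simp only [goB, hx, if_true, hgx, bne_self_eq_false, Bool.false_eq_true,
                if_false] at h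
              rcases ih seen h with ⟨r, hr, hq, c', hg, hne⟩ | ⟨r, hr, s, hs, h1, h2, h3, h4⟩
              · exact Or.inl ⟨r, List.mem_cons_of_mem x hr, hq, c', hg, hne⟩
              · exact Or.inr ⟨r, List.mem_cons_of_mem x hr, s, List.mem_cons_of_mem x hs,
                  h1, h2, h3, h4⟩
            · exact Or.inl ⟨x, List.mem_cons_self, hqx, c, hgx, hc⟩
        | none =>
            simp only [goB, hx, if_true, hgx] at h
            rcases ih _ h with ⟨r, hr, hq, c', hg, hne⟩ | ⟨r, hr, s, hs, h1, h2, h3, h4⟩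
            · rw [PySem.Dict.get?_insert] at hg
              by_cases hkk : keyB r = keyB x
              · rw [if_pos hkk] at hg
                cases hg
                exact Or.inr ⟨x, List.mem_cons_self, r, List.mem_cons_of_mem x hr,
                  hqx, hq, hkk.symm, fun he => hne he⟩
              · rw [if_neg hkk] at hg
                exact Or.inl ⟨r, List.mem_cons_of_mem x hr, hq, c', hg, hne⟩
            · exact Or.inr ⟨r, List.mem_cons_of_mem x hr, s, List.mem_cons_of_mem x hs,
                h1, h2, h3, h4⟩
      · have hx' : PySem.Set.contains (PySem.Set.ofList sc) (cidOf x) = false := by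
          simpa using hx
        simp only [goB, hx', Bool.false_eq_true, if_false] at h
        rcases ih seen h with ⟨r, hr, hq, c', hg, hne⟩ | ⟨r, hr, s, hs, h1, h2, h3, h4⟩
        · exact Or.inl ⟨r, List.mem_cons_of_mem x hr, hq, c', hg, hne⟩
        · exact Or.inr ⟨r, List.mem_cons_of_mem x hr, s, List.mem_cons_of_mem x hs,
            h1, h2, h3, h4⟩

theorem studentcheck_alt_iff (es : List (List String)) (sc : List String) :
    studentcheck_alt es sc = true ↔ ConflictPair sc es := by
  unfold studentcheck_alt ConflictPair
  constructor
  · intro h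
    rcases goB_sound sc es PySem.Dict.empty h with ⟨r, _, _, c, hg, _⟩ | hp
    · rw [PySem.Dict.get?_empty] at hg; cases hg
    · exact hp
  · intro hp
    exact goB_complete sc es PySem.Dict.empty hp

-- ===== VERDICT (by name: the statement is the Claim_ definition above) =====
theorem studentcheck_spec : Claim_equal_studentcheck := by
  intro es sc _ _
  unfold Spec_studentcheck
  rw [Bool.eq_iff_iff, studentcheck_iff, studentcheck_alt_iff]
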